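-- pv_equiv track=rewrite | github.com/benquick123/code-profiling | code/batch-1/dn6/M-207.py | hastegi_v_tvitu
-- ===== SOURCE A (Python) =====
-- def hastegi_v_tvitu(tvit):
--     vsi_tegi = []
--     locen_tvit = tvit.split(" ")
--     for beseda in locen_tvit:
--         if "#" in beseda:
--             izlocen_teg = izloci_besedo(beseda)
--             vsi_tegi.append(izlocen_teg)
--     return vsi_tegi
--
-- def izloci_besedo(beseda):
--    cnt1 = 0
--    cnt2 = 0
--    dolzina = len(beseda)
--    for i in range (0, dolzina):
--         if beseda[i].isalnum() == True:
--             break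
--         if beseda[i].isalnum() == False:
--             cnt1 += 1
--    obrnejana_beseda = beseda[::-1]
--    for j in range (0, dolzina):
--         if obrnejana_beseda[j].isalnum() == True:
--             break
--         if obrnejana_beseda[j].isalnum() == False:
--             cnt2 += 1
--    x = dolzina - cnt2
--    return beseda[cnt1:x]
-- ===== SOURCE B (Python) =====
-- def hastegi_v_tvitu(tvit):
--     return [izloci_besedo(beseda) for beseda in tvit.split(" ") if "#" in beseda]
--
-- def izloci_besedo(beseda):
--     fl = None
--     for i, ch in enumerate(beseda):
--         if ch.isalnum():
--             fl = (fl[0], i) if fl else (i, i)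
--     return "" if fl is None else beseda[fl[0]:fl[1] + 1]
-- ===== Notes on version B (the rewrite author's own statement) =====
-- stated objective: simpler
-- what changed: The trimming helper makes one forward pass recording the first and last alnum index and slices once, instead of counting a leading non-alnum run and then reversing the string to count a trailing run; the main loop becomes a single comprehension.
import Mathlib
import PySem

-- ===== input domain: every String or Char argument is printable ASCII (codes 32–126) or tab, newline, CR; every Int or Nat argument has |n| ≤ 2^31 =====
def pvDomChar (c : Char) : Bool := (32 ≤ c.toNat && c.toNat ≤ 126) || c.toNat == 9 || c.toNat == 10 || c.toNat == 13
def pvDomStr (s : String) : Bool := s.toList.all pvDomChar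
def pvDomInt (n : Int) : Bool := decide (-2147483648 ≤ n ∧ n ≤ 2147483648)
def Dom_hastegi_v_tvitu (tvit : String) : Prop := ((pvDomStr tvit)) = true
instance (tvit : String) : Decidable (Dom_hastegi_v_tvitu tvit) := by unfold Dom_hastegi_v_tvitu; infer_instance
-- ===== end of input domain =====

-- B trims each '#'-word in ONE forward pass (first/last alnum index) instead of A's
-- leading-run count plus reversed trailing-run count; objective: simpler.

-- ===== PORT A =====

-- A's break-loop: count chars before the first alnum one (procedes over the chars
-- that Python reads via beseda[i] for i in range(0, len)).
def pvCntRun (s : List Char) : Nat :=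
  match s with
  | [] => 0
  | c :: r => if PySem.Chars.isalnum c then 0 else pvCntRun r + 1

def izloci_besedo (beseda : List Char) : List Char :=
  let dolzina := beseda.length
  let cnt1 := pvCntRun beseda
  let obrnejana := beseda.reverse        -- beseda[::-1]
  let cnt2 := pvCntRun obrnejana
  let x := dolzina - cnt2
  PySem.List.slice beseda (some (cnt1 : Int)) (some (x : Int))

def hastegi_v_tvitu (tvit : String) : List String :=
  (PySem.Chars.splitOn tvit.toList [' ']).foldl
    (fun vsi_tegi beseda =>
      if PySem.Chars.isIn ['#'] beseda then
        vsi_tegi ++ [String.ofList (izloci_besedo beseda)]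
      else vsi_tegi) []

-- ===== PORT B =====

-- B's single pass: fl = None, then fl = (fl[0], i) if fl else (i, i) at each alnum char.
def pvScanFL (s : List Char) (i : Nat) (fl : Option (Nat × Nat)) : Option (Nat × Nat) :=
  match s with
  | [] => fl
  | c :: r =>
      pvScanFL r (i + 1)
        (if PySem.Chars.isalnum c then
           match fl with
           | none => some (i, i)
           | some (f, _) => some (f, i)
         else fl)

def izloci_besedo_alt (beseda : List Char) : List Char :=
  match pvScanFL beseda 0 none with
  | none => []
  | some (f, la) => PySem.List.slice beseda (some (f : Int)) (some ((la + 1 : Nat) : Int))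

def hastegi_v_tvitu_alt (tvit : String) : List String :=
  ((PySem.Chars.splitOn tvit.toList [' ']).filter
      (fun beseda => PySem.Chars.isIn ['#'] beseda)).map
    (fun beseda => String.ofList (izloci_besedo_alt beseda))

-- ===== PRECONDITION & SPEC =====

def Spec_hastegi_v_tvitu (tvit : String) (out : List String) : Prop :=
  out = hastegi_v_tvitu_alt tvit

instance (tvit : String) (out : List String) : Decidable (Spec_hastegi_v_tvitu tvit out) := by
  unfold Spec_hastegi_v_tvitu; infer_instance

-- ===== CLAIM =====

def Claim_equal_hastegi_v_tvitu : Prop :=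
  ∀ (tvit : String), Dom_hastegi_v_tvitu tvit → Spec_hastegi_v_tvitu tvit (hastegi_v_tvitu tvit)

-- ===== LEMMAS AND PROOFS =====

-- index of the first alnum char
def pvFirstA (s : List Char) : Option Nat :=
  match s with
  | [] => none
  | c :: r => if PySem.Chars.isalnum c then some 0 else (pvFirstA r).map (· + 1)

-- index of the last alnum char
def pvLastA (s : List Char) : Option Nat :=
  match s with
  | [] => none
  | c :: r =>
      match pvLastA r with
      | some k => some (k + 1)
      | none => if PySem.Chars.isalnum c then some 0 else none

theorem pvScanFL_some (s : List Char) : ∀ (i f la : Nat),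
    pvScanFL s i (some (f, la)) =
      some (f, match pvLastA s with | some k => i + k | none => la) := by
  induction s with
  | nil => intro i f la; simp [pvScanFL, pvLastA]
  | cons c r ih =>
    intro i f la
    cases hc : PySem.Chars.isalnum c
    · simp only [pvScanFL, hc, Bool.false_eq_true, if_false, ih, pvLastA]
      cases h : pvLastA r <;> simp [h] <;> ac_rfl
    · simp only [pvScanFL, hc, if_true, ih, pvLastA]
      cases h : pvLastA r <;> simp [h] <;> ac_rfl

theorem pvScanFL_none (s : List Char) : ∀ (i : Nat),
    pvScanFL s i none =
      match pvFirstA s, pvLastA s with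
      | some f, some k => some (i + f, i + k)
      | _, _ => none := by
  induction s with
  | nil => intro i; simp [pvScanFL, pvFirstA, pvLastA]
  | cons c r ih =>
    intro i
    cases hc : PySem.Chars.isalnum c
    · simp only [pvScanFL, hc, Bool.false_eq_true, if_false, ih, pvFirstA, pvLastA]
      cases hf : pvFirstA r <;> cases h : pvLastA r <;> simp [hf, h] <;>
        first | ac_rfl | exact ⟨by ac_rfl, by ac_rfl⟩
    · simp only [pvScanFL, hc, if_true, pvScanFL_some, pvFirstA, pvLastA]
      cases h : pvLastA r <;> simp [h] <;> ac_rfl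

theorem pvCntRun_all_false (s : List Char) (h : ∀ c ∈ s, PySem.Chars.isalnum c = false) :
    pvCntRun s = s.length := by
  induction s with
  | nil => rfl
  | cons c r ih =>
    have hc := h c (by simp)
    simp [pvCntRun, hc, ih fun d hd => h d (by simp [hd])]

theorem pvFirstA_none (s : List Char) (h : pvFirstA s = none) :
    ∀ c ∈ s, PySem.Chars.isalnum c = false := by
  induction s with
  | nil => simp
  | cons c r ih =>
    cases hc : PySem.Chars.isalnum c
    · simp only [pvFirstA, hc, Bool.false_eq_true, if_false, Option.map_eq_none_iff] at h
      intro d hd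
      rcases List.mem_cons.mp hd with rfl | hd'
      · exact hc
      · exact ih h d hd'
    · simp [pvFirstA, hc] at h

theorem pvLastA_none (s : List Char) (h : pvLastA s = none) :
    ∀ c ∈ s, PySem.Chars.isalnum c = false := by
  induction s with
  | nil => simp
  | cons c r ih =>
    simp only [pvLastA] at h
    cases hr : pvLastA r with
    | some k => simp [hr] at h
    | none =>
      simp only [hr] at h
      intro d hd
      rcases List.mem_cons.mp hd with rfl | hd'
      · cases hc : PySem.Chars.isalnum d
        · rfl
        · simp [hc] at h
      · exact ih hr d hd'

theorem pvFirstA_some (s : List Char) : ∀ f, pvFirstA s = some f → pvCntRun s = f := by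
  induction s with
  | nil => simp [pvFirstA]
  | cons c r ih =>
    intro f h
    cases hc : PySem.Chars.isalnum c
    · cases hr : pvFirstA r with
      | none => simp [pvFirstA, hc, hr] at h
      | some g =>
        simp only [pvFirstA, hc, hr, Bool.false_eq_true, if_false, Option.map_some,
          Option.some.injEq] at h
        simp [pvCntRun, hc, ih g hr, ← h]
    · simp only [pvFirstA, hc, if_true, Option.some.injEq] at h
      simp [pvCntRun, hc, ← h]

theorem pvLastA_concat (s : List Char) (c : Char) :
    pvLastA (s ++ [c]) =
      if PySem.Chars.isalnum c then some s.length else pvLastA s := by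
  induction s with
  | nil => cases hc : PySem.Chars.isalnum c <;> simp [pvLastA, hc]
  | cons d r ih =>
    simp only [List.cons_append, pvLastA, ih]
    cases hc : PySem.Chars.isalnum c
    · simp
    · cases hr : pvLastA r <;> simp [hr]

theorem pvLastA_some (s : List Char) : ∀ k, pvLastA s = some k →
    k + 1 + pvCntRun s.reverse = s.length := by
  induction s using List.reverseRecOn with
  | nil => simp [pvLastA]
  | append_singleton r c ih =>
    intro k h
    rw [pvLastA_concat] at h
    cases hc : PySem.Chars.isalnum c
    · rw [hc] at h
      simp only [Bool.false_eq_true, if_false] at h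
      have := ih k h
      simp only [List.reverse_append, List.reverse_cons, List.reverse_nil,
        List.nil_append, List.singleton_append, pvCntRun, hc, Bool.false_eq_true, if_false]
      simp only [List.length_append, List.length_cons, List.length_nil]
      omega
    · rw [hc] at h
      simp only [if_true, Option.some.injEq] at h
      subst h
      simp [List.reverse_append, pvCntRun, hc]

-- the per-word core: A's trim equals B's trim
theorem pvTrim_eq (beseda : List Char) : izloci_besedo beseda = izloci_besedo_alt beseda := by
  unfold izloci_besedo izloci_besedo_alt
  rw [pvScanFL_none]
  cases hf : pvFirstA beseda with
  | none =>
    have hall := pvFirstA_none beseda hf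
    have h1 : pvCntRun beseda = beseda.length := pvCntRun_all_false beseda hall
    have h2 : pvCntRun beseda.reverse = beseda.length := by
      rw [pvCntRun_all_false beseda.reverse (fun c hc => hall c (List.mem_reverse.mp hc))]
      simp
    cases hl : pvLastA beseda <;>
      · rw [PySem.List.slice_natCast, h1, h2]
        simp
  | some f =>
    cases hl : pvLastA beseda with
    | none =>
      have hall := pvLastA_none beseda hl
      have h1 : pvCntRun beseda = beseda.length := pvCntRun_all_false beseda hall
      have h2 : pvCntRun beseda.reverse = beseda.length := by
        rw [pvCntRun_all_false beseda.reverse (fun c hc => hall c (List.mem_reverse.mp hc))]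
        simp
      rw [PySem.List.slice_natCast, h1, h2]
      simp
    | some k =>
      have h1 : pvCntRun beseda = f := pvFirstA_some beseda f hf
      have h2 := pvLastA_some beseda k hl
      have hx : beseda.length - pvCntRun beseda.reverse = k + 1 := by omega
      simp only [PySem.List.slice_natCast, h1, hx, Nat.zero_add]

-- ===== VERDICT =====

theorem hastegi_v_tvitu_spec : Claim_equal_hastegi_v_tvitu := by
  intro tvit _
  unfold Spec_hastegi_v_tvitu hastegi_v_tvitu hastegi_v_tvitu_alt
  rw [PySem.List.foldl_append_if (fun beseda => PySem.Chars.isIn ['#'] beseda)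
        (fun beseda => String.ofList (izloci_besedo beseda))]
  simp [pvTrim_eq]
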